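-- pv_equiv track=rewrite | github.com/parthsangani00/ASR-Hacker | literalFinder.py | enumerateStrings
-- ===== SOURCE A (Python) =====
-- def checkKeywordSpecialChar(token):
--     '''
--         gives a boolean response true if the token is a keyword or special character
--     [Natural Join, Limit, In]
--     []
--     '''
--     keywords = ["select","from","where","and","or","not","sum","count","max","min","avg","between","order","group",\
--         "by","eoq"]
--     specialCharacters = ["=", "*", "<", ">", ".", ",", "(", ")"]
--     token = token.lower()
--     if (token in keywords) or (token in specialCharacters):
--         return True
--     else:
--         return False
--
-- def enumerateStrings(startIndex, endIndex, translatedOutput):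
--     '''
--         enumerates all possible strings between startIndex and endIndex
--     '''
--     A = []
--     positions = []
--     i = startIndex
--     windowSize = endIndex - startIndex
--
--     while(i<endIndex):
--
--         j = i
--         k = 0
--         currentString = ""
--
--         while (j<endIndex) and (k<windowSize) and (not checkKeywordSpecialChar(translatedOutput[j])):
--             currentString = currentString + translatedOutput[j]
--             # A.append(phoneticRepresentation(currentString))
--             # slight variation from original pseudocode since phonetic representations are not available
--             A.append(currentString)
--             positions.append(j)
--             j+=1
--             k+=1
--
--         i+=1
--
--     return A, positions
-- ===== SOURCE B (Python) =====
-- def enumerateStrings(startIndex, endIndex, translatedOutput):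
--     '''
--         enumerates all possible strings between startIndex and endIndex
--         (segment decomposition: split [startIndex, endIndex) into maximal runs
--         of non-keyword/non-special tokens, then enumerate prefixes per run)
--     '''
--     stopTokens = {"select","from","where","and","or","not","sum","count","max",
--                   "min","avg","between","order","group","by","eoq",
--                   "=", "*", "<", ">", ".", ",", "(", ")"}
--     A = []
--     positions = []
--     s = startIndex
--     while s < endIndex:
--         if translatedOutput[s].lower() in stopTokens:
--             s += 1
--             continue
--         e = s
--         while e < endIndex and translatedOutput[e].lower() not in stopTokens:
--             e += 1
--         for i in range(s, e):
--             current = ""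
--             for j in range(i, e):
--                 current += translatedOutput[j]
--                 A.append(current)
--                 positions.append(j)
--         s = e + 1
--     return A, positions
-- ===== Notes on version B (the rewrite author's own statement) =====
-- stated objective: alternative
-- what changed: Instead of restarting the keyword/special-char stop-check scan at every start index, B first finds each maximal contiguous run of non-stop tokens and then enumerates the growing prefixes within that run, emitting the same strings and positions in the same order.
import Mathlib
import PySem

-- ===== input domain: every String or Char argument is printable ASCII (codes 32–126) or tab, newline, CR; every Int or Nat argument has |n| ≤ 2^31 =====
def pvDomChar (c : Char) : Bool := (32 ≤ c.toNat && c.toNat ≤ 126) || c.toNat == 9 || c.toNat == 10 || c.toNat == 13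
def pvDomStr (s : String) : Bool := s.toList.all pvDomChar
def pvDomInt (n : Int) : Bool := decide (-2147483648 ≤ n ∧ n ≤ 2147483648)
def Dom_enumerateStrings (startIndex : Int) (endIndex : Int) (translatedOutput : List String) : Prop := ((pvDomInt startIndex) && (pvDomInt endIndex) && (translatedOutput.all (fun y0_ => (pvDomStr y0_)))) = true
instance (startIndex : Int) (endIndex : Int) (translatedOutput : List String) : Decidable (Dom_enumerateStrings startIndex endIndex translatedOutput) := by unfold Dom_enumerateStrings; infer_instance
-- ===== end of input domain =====

-- B re-derives the same enumeration by first cutting [startIndex,endIndex) into maximal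
-- runs of non-keyword/non-special tokens and then emitting growing prefixes inside each
-- run (objective: alternative decomposition; A restarts the stop-check scan at every start).

-- ===== PORT A =====
def pvKeywords : List String :=
  ["select","from","where","and","or","not","sum","count","max","min","avg","between","order","group","by","eoq"]
def pvSpecials : List String := ["=", "*", "<", ">", ".", ",", "(", ")"]

def checkKeywordSpecialChar (token : String) : Bool :=
  let token := PySem.Str.lower token
  if pvKeywords.contains token || pvSpecials.contains token then true else false

-- translatedOutput[j] with Python indexing; the .getD "" only fires where Python raises
-- IndexError (outside Pre_), it is a totality default, not a semantic choice.
def pvTok (ts : List String) (j : Int) : String := (PySem.List.pyGet? ts j).getD ""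

-- A's inner while loop; fuel (endIndex - j).toNat bounds the iteration count
def innerA (ts : List String) (endIndex windowSize : Int) :
    Nat → Int → Int → String → List String × List Int
  | 0, _, _, _ => ([], [])
  | fuel + 1, j, k, cur =>
    if j < endIndex ∧ k < windowSize ∧ checkKeywordSpecialChar (pvTok ts j) = false then
      let cur' := cur ++ pvTok ts j
      let rest := innerA ts endIndex windowSize fuel (j + 1) (k + 1) cur'
      (cur' :: rest.1, j :: rest.2)
    else ([], [])

-- A's outer while loop
def outerA (ts : List String) (endIndex windowSize : Int) :
    Nat → Int → List String × List Int
  | 0, _ => ([], [])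
  | fuel + 1, i =>
    if i < endIndex then
      let one := innerA ts endIndex windowSize (endIndex - i).toNat i 0 ""
      let rest := outerA ts endIndex windowSize fuel (i + 1)
      (one.1 ++ rest.1, one.2 ++ rest.2)
    else ([], [])

def enumerateStrings (startIndex : Int) (endIndex : Int) (translatedOutput : List String) :
    List String × List Int :=
  outerA translatedOutput endIndex (endIndex - startIndex) (endIndex - startIndex).toNat startIndex

-- ===== PORT B =====
def pvStopTokens : List String :=
  ["select","from","where","and","or","not","sum","count","max","min","avg","between","order",
   "group","by","eoq","=", "*", "<", ">", ".", ",", "(", ")"]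

def isStopTok (ts : List String) (j : Int) : Bool :=
  pvStopTokens.contains (PySem.Str.lower (pvTok ts j))

-- B's inner scan for the end of the current maximal non-stop run
def segEnd (ts : List String) (endIndex : Int) : Nat → Int → Int
  | 0, e => e
  | fuel + 1, e =>
    if e < endIndex ∧ isStopTok ts e = false then segEnd ts endIndex fuel (e + 1) else e

-- B's innermost loop: growing prefixes from j up to the run end e
def growPrefix (ts : List String) (e : Int) : Nat → Int → String → List String × List Int
  | 0, _, _ => ([], [])
  | fuel + 1, j, cur =>
    if j < e then
      let cur' := cur ++ pvTok ts j
      let rest := growPrefix ts e fuel (j + 1) cur'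
      (cur' :: rest.1, j :: rest.2)
    else ([], [])

-- B's per-run loop over start positions
def emitSeg (ts : List String) (e : Int) : Nat → Int → List String × List Int
  | 0, _ => ([], [])
  | fuel + 1, i =>
    if i < e then
      let one := growPrefix ts e (e - i).toNat i ""
      let rest := emitSeg ts e fuel (i + 1)
      (one.1 ++ rest.1, one.2 ++ rest.2)
    else ([], [])

-- B's outer loop over runs
def outerB (ts : List String) (endIndex : Int) : Nat → Int → List String × List Int
  | 0, _ => ([], [])
  | fuel + 1, s =>
    if s < endIndex then
      if isStopTok ts s then outerB ts endIndex fuel (s + 1)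
      else
        let e := segEnd ts endIndex (endIndex - s).toNat s
        let seg := emitSeg ts e (e - s).toNat s
        let rest := outerB ts endIndex fuel (e + 1)
        (seg.1 ++ rest.1, seg.2 ++ rest.2)
    else ([], [])

def enumerateStrings_alt (startIndex : Int) (endIndex : Int) (translatedOutput : List String) :
    List String × List Int :=
  outerB translatedOutput endIndex (endIndex - startIndex).toNat startIndex

-- ===== PRECONDITION & SPEC =====
-- Pre_ excludes exactly the inputs on which Python A raises IndexError: a nonempty window
-- whose index range leaves the valid Python index range of translatedOutput.
def Pre_enumerateStrings (startIndex : Int) (endIndex : Int) (translatedOutput : List String) : Prop :=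
  startIndex < endIndex →
    (-(translatedOutput.length : Int) ≤ startIndex ∧ endIndex ≤ (translatedOutput.length : Int))
instance (startIndex : Int) (endIndex : Int) (translatedOutput : List String) :
    Decidable (Pre_enumerateStrings startIndex endIndex translatedOutput) := by
  unfold Pre_enumerateStrings; infer_instance

def pvWitness_enumerateStrings : Int × Int × List String := (0, 3, ["ab", "select", "cd"])

def Spec_enumerateStrings (startIndex : Int) (endIndex : Int) (translatedOutput : List String) (out : List String × List Int) : Prop := out = enumerateStrings_alt startIndex endIndex translatedOutput
instance (startIndex : Int) (endIndex : Int) (translatedOutput : List String) (out : List String × List Int) : Decidable (Spec_enumerateStrings startIndex endIndex translatedOutput out) := by unfold Spec_enumerateStrings; infer_instance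

-- ===== CLAIM (what is proved, stated in full; the proofs are below) =====
def Claim_equal_enumerateStrings : Prop := ∀ (startIndex : Int) (endIndex : Int) (translatedOutput : List String), Dom_enumerateStrings startIndex endIndex translatedOutput → Pre_enumerateStrings startIndex endIndex translatedOutput → Spec_enumerateStrings startIndex endIndex translatedOutput (enumerateStrings startIndex endIndex translatedOutput)

-- ===== LEMMAS AND PROOFS =====

-- the two stop predicates agree
theorem stop_eq (ts : List String) (j : Int) :
    isStopTok ts j = checkKeywordSpecialChar (pvTok ts j) := by
  simp [isStopTok, checkKeywordSpecialChar, pvStopTokens, pvKeywords, pvSpecials,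
    List.contains_eq_mem, Bool.or_assoc]

-- fueled segEnd: with enough fuel it yields the end of the maximal non-stop run
theorem segEnd_props (ts : List String) (endIndex : Int) :
    ∀ (fuel : Nat) (e0 : Int), (endIndex - e0).toNat ≤ fuel → e0 ≤ endIndex →
      e0 ≤ segEnd ts endIndex fuel e0 ∧ segEnd ts endIndex fuel e0 ≤ endIndex ∧
      (segEnd ts endIndex fuel e0 = endIndex ∨ isStopTok ts (segEnd ts endIndex fuel e0) = true) ∧
      (∀ m, e0 ≤ m → m < segEnd ts endIndex fuel e0 → isStopTok ts m = false) := by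
  intro fuel
  induction fuel with
  | zero =>
    intro e0 hf he
    have : e0 = endIndex := by omega
    simp [segEnd, this]
    omega
  | succ n ih =>
    intro e0 hf he
    by_cases hc : e0 < endIndex ∧ isStopTok ts e0 = false
    · rw [segEnd, if_pos hc]
      obtain ⟨h1, h2, h3, h4⟩ := ih (e0 + 1) (by omega) (by omega)
      refine ⟨by omega, h2, h3, ?_⟩
      intro m hm1 hm2
      by_cases hme : m = e0
      · subst hme; exact hc.2
      · exact h4 m (by omega) hm2
    · rw [segEnd, if_neg hc]
      refine ⟨le_refl _, he, ?_, by intro m h1 h2; omega⟩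
      by_cases h0 : e0 = endIndex
      · left; exact h0
      · right
        rcases not_and_or.mp hc with h | h
        · omega
        · simpa using h

-- outerA only depends on fuel being sufficient
theorem outerA_congr (ts : List String) (endIndex windowSize : Int) :
    ∀ (n m : Nat) (i : Int), (endIndex - i).toNat ≤ n → (endIndex - i).toNat ≤ m →
      outerA ts endIndex windowSize n i = outerA ts endIndex windowSize m i := by
  intro n
  induction n with
  | zero =>
    intro m i hn hm
    have hi : ¬ i < endIndex := by omega
    cases m with
    | zero => rfl
    | succ m => rw [outerA, outerA, if_neg hi]
  | succ n ih =>
    intro m i hn hm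
    by_cases hi : i < endIndex
    · cases m with
      | zero => omega
      | succ m =>
        rw [outerA, outerA, if_pos hi, if_pos hi]
        simp only
        rw [ih m (i + 1) (by omega) (by omega)]
    · cases m with
      | zero => rw [outerA, outerA, if_neg hi]
      | succ m => rw [outerA, outerA, if_neg hi, if_neg hi]

-- inside a maximal run ending at e, A's inner loop (with its never-binding
-- k < windowSize test) computes exactly B's growPrefix loop
theorem innerA_eq_grow (ts : List String) (endIndex startIndex e i : Int)
    (hle : e ≤ endIndex) (hstop : e = endIndex ∨ isStopTok ts e = true)
    (hi : startIndex ≤ i) :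
    ∀ (n : Nat) (j k : Int) (cur : String), (endIndex - j).toNat ≤ n →
      i ≤ j → j ≤ e → k = j - i →
      (∀ m, j ≤ m → m < e → isStopTok ts m = false) →
      innerA ts endIndex (endIndex - startIndex) n j k cur =
        growPrefix ts e (e - j).toNat j cur := by
  intro n
  induction n with
  | zero =>
    intro j k cur hn hij hje hk hns
    have hje' : j = e := by omega
    have : (e - j).toNat = 0 := by omega
    rw [this, innerA, growPrefix]
  | succ n ih =>
    intro j k cur hn hij hje hk hns
    by_cases hje' : j = e
    · have h0 : (e - j).toNat = 0 := by omega
      have hne : ¬ (j < endIndex ∧ k < endIndex - startIndex ∧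
          checkKeywordSpecialChar (pvTok ts j) = false) := by
        rcases hstop with h | h
        · intro hc; exact absurd hc.1 (by omega)
        · intro hc
          have := hc.2.2
          rw [← stop_eq, hje', h] at this
          exact absurd this (by simp)
      rw [h0, innerA, growPrefix, if_neg hne]
    · have hjlt : j < e := by omega
      have hcf : checkKeywordSpecialChar (pvTok ts j) = false := by
        rw [← stop_eq]; exact hns j (le_refl _) hjlt
      have hfe : (e - j).toNat = (e - (j + 1)).toNat + 1 := by omega
      rw [hfe, innerA, growPrefix, if_pos ⟨by omega, by omega, hcf⟩, if_pos hjlt]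
      simp only
      rw [ih (j + 1) (k + 1) (cur ++ pvTok ts j) (by omega) (by omega) (by omega) (by omega)
        (fun m h1 h2 => hns m (by omega) h2)]

-- walking A's outer loop across one maximal run produces B's per-run output
theorem outerA_segment (ts : List String) (endIndex startIndex e : Int)
    (hle : e ≤ endIndex) (hstop : e = endIndex ∨ isStopTok ts e = true) :
    ∀ (n : Nat) (i : Int), (endIndex - i).toNat ≤ n → startIndex ≤ i → i ≤ e →
      (∀ m, i ≤ m → m < e → isStopTok ts m = false) →
      outerA ts endIndex (endIndex - startIndex) n i =
        ((emitSeg ts e (e - i).toNat i).1 ++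
          (outerA ts endIndex (endIndex - startIndex) (endIndex - (e + 1)).toNat (e + 1)).1,
         (emitSeg ts e (e - i).toNat i).2 ++
          (outerA ts endIndex (endIndex - startIndex) (endIndex - (e + 1)).toNat (e + 1)).2) := by
  intro n
  induction n with
  | zero =>
    intro i hn hi1 hi2 hns
    have hie : i = e := by omega
    subst hie
    have h1 : (i - i).toNat = 0 := by omega
    have h2 : (endIndex - (i + 1)).toNat = 0 := by omega
    rw [h1, h2, outerA, emitSeg, outerA]
    simp
  | succ n ih =>
    intro i hn hi1 hi2 hns
    by_cases hie : i = e
    · subst hie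
      have h1 : (i - i).toNat = 0 := by omega
      rw [h1, emitSeg]
      simp only [List.nil_append]
      rcases hstop with h | h
      · have hlt : ¬ i < endIndex := by omega
        have h2 : (endIndex - (i + 1)).toNat = 0 := by omega
        rw [outerA, if_neg hlt, h2, outerA]
      · by_cases hlt : i < endIndex
        · rw [outerA, if_pos hlt]
          have hinner : innerA ts endIndex (endIndex - startIndex)
              (endIndex - i).toNat i 0 "" = ([], []) := by
            have hne : ¬ (i < endIndex ∧ (0:Int) < endIndex - startIndex ∧
                checkKeywordSpecialChar (pvTok ts i) = false) := by
              intro hc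
              have := hc.2.2
              rw [← stop_eq, h] at this
              exact absurd this (by simp)
            have : (endIndex - i).toNat = ((endIndex - i).toNat - 1) + 1 := by omega
            rw [this, innerA, if_neg hne]
          rw [hinner]
          simp only [List.nil_append]
          rw [outerA_congr ts endIndex (endIndex - startIndex)
            n (endIndex - (i + 1)).toNat (i + 1) (by omega) (by omega)]
        · have h2 : (endIndex - (i + 1)).toNat = 0 := by omega
          rw [outerA, if_neg hlt, h2, outerA]
    · have hilt : i < e := by omega
      rw [outerA, if_pos (by omega)]
      rw [innerA_eq_grow ts endIndex startIndex e i hle hstop hi1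
        (endIndex - i).toNat i 0 "" (le_refl _) (le_refl _) (by omega) (by omega) hns]
      simp only
      rw [ih (i + 1) (by omega) (by omega) (by omega) (fun m h1 h2 => hns m (by omega) h2)]
      have hfe : (e - i).toNat = (e - (i + 1)).toNat + 1 := by omega
      conv_rhs => rw [hfe, emitSeg, if_pos hilt]
      simp [List.append_assoc]

-- A's outer loop equals B's run-by-run loop
theorem outerA_eq_outerB (ts : List String) (endIndex startIndex : Int) :
    ∀ (n fa m : Nat) (s : Int), (endIndex - s).toNat ≤ n → (endIndex - s).toNat ≤ fa →
      (endIndex - s).toNat ≤ m → startIndex ≤ s →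
      outerA ts endIndex (endIndex - startIndex) fa s = outerB ts endIndex m s := by
  intro n
  induction n with
  | zero =>
    intro fa m s hn hfa hm hs
    have hlt : ¬ s < endIndex := by omega
    cases fa with
    | zero =>
      cases m with
      | zero => rfl
      | succ m => rw [outerA, outerB, if_neg hlt]
    | succ fa =>
      cases m with
      | zero => rw [outerA, outerB, if_neg hlt]
      | succ m => rw [outerA, outerB, if_neg hlt, if_neg hlt]
  | succ n ih =>
    intro fa m s hn hfa hm hs
    by_cases hlt : s < endIndex
    · cases fa with
      | zero => omega
      | succ fa =>
        cases m with
        | zero => omega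
        | succ m =>
          by_cases hstop : isStopTok ts s = true
          · rw [outerA, outerB, if_pos hlt, if_pos hlt, if_pos hstop]
            have hinner : innerA ts endIndex (endIndex - startIndex)
                (endIndex - s).toNat s 0 "" = ([], []) := by
              have hne : ¬ (s < endIndex ∧ (0:Int) < endIndex - startIndex ∧
                  checkKeywordSpecialChar (pvTok ts s) = false) := by
                intro hc
                have := hc.2.2
                rw [← stop_eq, hstop] at this
                exact absurd this (by simp)
              have : (endIndex - s).toNat = ((endIndex - s).toNat - 1) + 1 := by omega
              rw [this, innerA, if_neg hne]
            rw [hinner]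
            simp only [List.nil_append]
            exact ih fa m (s + 1) (by omega) (by omega) (by omega) (by omega)
          · simp only [Bool.not_eq_true] at hstop
            set e := segEnd ts endIndex (endIndex - s).toNat s with he
            obtain ⟨h1, h2, h3, h4⟩ := segEnd_props ts endIndex
              (endIndex - s).toNat s (le_refl _) (by omega)
            rw [← he] at h1 h2 h3 h4
            rw [outerA_segment ts endIndex startIndex e h2 h3 (fa + 1) s (by omega) hs h1 h4]
            rw [outerB, if_pos hlt, if_neg (by simp [hstop]), ← he]
            simp only
            rw [ih (endIndex - (e + 1)).toNat m (e + 1) (by omega) (le_refl _)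
              (by omega) (by omega)]
    · cases fa with
      | zero =>
        cases m with
        | zero => rfl
        | succ m => rw [outerA, outerB, if_neg hlt]
      | succ fa =>
        cases m with
        | zero => rw [outerA, outerB, if_neg hlt]
        | succ m => rw [outerA, outerB, if_neg hlt, if_neg hlt]

theorem enumerateStrings_eq (startIndex endIndex : Int) (ts : List String) :
    enumerateStrings startIndex endIndex ts = enumerateStrings_alt startIndex endIndex ts := by
  unfold enumerateStrings enumerateStrings_alt
  exact outerA_eq_outerB ts endIndex startIndex (endIndex - startIndex).toNat
    (endIndex - startIndex).toNat (endIndex - startIndex).toNat startIndex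
    (le_refl _) (le_refl _) (le_refl _) (le_refl _)

-- ===== VERDICT (by name: the statement is the Claim_ definition above) =====
theorem enumerateStrings_spec : Claim_equal_enumerateStrings := by
  intro s e ts _ _
  unfold Spec_enumerateStrings
  exact enumerateStrings_eq s e ts
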